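-- pv_equiv track=rewrite | github.com/MDCox/omuse | musicgen.py | genChords
-- ===== SOURCE A (Python) =====
-- def genChords(scale, chordDepth):
--     chords = [[],[],[],[],[],[],[]]
--
--     # There must be a better way to do this. Probably a generator or itertools.
--     repeatedScale = scale*3
--     for i in range(0,7):
--         chords[i].append(repeatedScale[i])
--         chords[i].append(repeatedScale[i + 2])
--         chords[i].append(repeatedScale[i + 4])
--         if chordDepth > 1:
--             chords[i].append(repeatedScale[i + 6])
--             if chordDepth > 2:
--                 chords[i].append(repeatedScale[i + 8])
--                 if chordDepth > 3:
--                     chords[i].append(repeatedScale[i + 10])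
--
--     return chords
-- ===== SOURCE B (Python) =====
-- def genChords(scale, chordDepth):
--     # Build voice-by-voice (column-wise), then transpose: voice j holds the j-th
--     # note of every one of the 7 chords; zip(*voices) regroups them per chord.
--     repeated = scale * 3
--     count = 3 + (chordDepth > 1) + (chordDepth > 2) + (chordDepth > 3)
--     voices = [[repeated[2 * j + i] for i in range(7)] for j in range(count)]
--     return [list(chord) for chord in zip(*voices)]
-- ===== Notes on version B (the rewrite author's own statement) =====
-- stated objective: alternative
-- what changed: B builds the result column-wise: it first materialises each chord voice (the j-th note of all 7 chords) as its own list and then transposes with zip(*voices), with the note count computed as 3 plus a sum of boolean indicators, instead of A's row-wise per-chord appends under a nested if-cascade.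
import Mathlib
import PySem

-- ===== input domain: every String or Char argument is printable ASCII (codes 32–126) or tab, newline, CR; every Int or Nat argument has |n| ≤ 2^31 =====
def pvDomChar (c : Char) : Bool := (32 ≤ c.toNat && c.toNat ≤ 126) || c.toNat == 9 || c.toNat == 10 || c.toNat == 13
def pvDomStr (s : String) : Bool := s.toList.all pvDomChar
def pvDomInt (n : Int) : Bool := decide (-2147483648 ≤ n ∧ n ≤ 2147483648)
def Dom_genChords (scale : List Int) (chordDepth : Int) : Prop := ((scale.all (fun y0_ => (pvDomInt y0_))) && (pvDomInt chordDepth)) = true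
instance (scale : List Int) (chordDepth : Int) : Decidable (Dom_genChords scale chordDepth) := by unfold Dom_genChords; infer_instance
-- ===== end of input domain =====

-- B builds the chords column-wise — one list per voice, then a transpose (zip(*voices)) —
-- instead of A's row-wise per-chord appends under a nested if-cascade (objective: alternative).

-- shared primitive: Python's repeatedScale[k] for a nonnegative index; 0 stands for the
-- IndexError case, which Pre_genChords excludes
def pyAt (xs : List Int) (k : Nat) : Int := (PySem.List.pyGet? xs (k : Int)).getD 0

-- ===== PORT A =====
-- one iteration of A's 'for i in range(0,7)' body: append into chords[i]
def genChordsStep (rs : List Int) (chordDepth : Int) (chords : List (List Int)) (i : Nat) :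
    List (List Int) :=
  let c := chords.getD i []
  let c := c ++ [pyAt rs i]
  let c := c ++ [pyAt rs (i + 2)]
  let c := c ++ [pyAt rs (i + 4)]
  let c :=
    if chordDepth > 1 then
      let c := c ++ [pyAt rs (i + 6)]
      if chordDepth > 2 then
        let c := c ++ [pyAt rs (i + 8)]
        if chordDepth > 3 then c ++ [pyAt rs (i + 10)] else c
      else c
    else c
  chords.set i c

def genChords (scale : List Int) (chordDepth : Int) : List (List Int) :=
  let repeatedScale := scale ++ scale ++ scale
  (List.range 7).foldl (genChordsStep repeatedScale chordDepth) [[],[],[],[],[],[],[]]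

-- ===== PORT B =====
-- Python's zip(* rows): take one element off the front of every row until some row
-- (or the row list itself) is empty — exact on the nonempty-rows case Source B reaches
def pyZipN (ls : List (List Int)) : List (List Int) :=
  if h : ls ≠ [] ∧ ls.all (fun l => !l.isEmpty) then
    (ls.map (fun l => l.headD 0)) :: pyZipN (ls.map List.tail)
  else []
termination_by (ls.headD []).length
decreasing_by
  rcases ls with _ | ⟨x, rest⟩
  · exact absurd rfl h.1
  · have hx : x ≠ [] := by
      have := h.2; simp [List.all_cons] at this
      simpa [List.isEmpty_iff] using this.1
    rcases x with _ | ⟨a, t⟩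
    · exact absurd rfl hx
    · simp [List.headD]

def genChords_alt (scale : List Int) (chordDepth : Int) : List (List Int) :=
  let repeated := scale ++ scale ++ scale
  let count : Nat :=
    3 + (if chordDepth > 1 then 1 else 0) + (if chordDepth > 2 then 1 else 0)
      + (if chordDepth > 3 then 1 else 0)
  let voices := (List.range count).map (fun j => (List.range 7).map (fun i => pyAt repeated (2 * j + i)))
  pyZipN voices

-- ===== PRECONDITION & SPEC =====
-- Pre_ excludes exactly the inputs where Python's A raises IndexError (scale too short for
-- the deepest index accessed, 6 + 2*(count-1)); B raises the same IndexError there.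
def Pre_genChords (scale : List Int) (chordDepth : Int) : Prop :=
  3 * (scale.length : Int) > 2 * max 3 (min (chordDepth + 2) 6) + 4

instance (scale : List Int) (chordDepth : Int) : Decidable (Pre_genChords scale chordDepth) := by
  unfold Pre_genChords; infer_instance

def pvWitness_genChords : List Int × Int := ([0, 2, 4, 5, 7], 2)

def Spec_genChords (scale : List Int) (chordDepth : Int) (out : List (List Int)) : Prop :=
  out = genChords_alt scale chordDepth
instance (scale : List Int) (chordDepth : Int) (out : List (List Int)) : Decidable (Spec_genChords scale chordDepth out) := by unfold Spec_genChords; infer_instance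

-- ===== CLAIM (what is proved, stated in full; the proofs are below) =====
def Claim_equal_genChords : Prop := ∀ (scale : List Int) (chordDepth : Int), Dom_genChords scale chordDepth → Pre_genChords scale chordDepth → Spec_genChords scale chordDepth (genChords scale chordDepth)

-- ===== LEMMAS AND PROOFS =====

-- ===== VERDICT (by name: the statement is the Claim_ definition above) =====
theorem genChords_spec : Claim_equal_genChords := by
  intro scale d _ _
  unfold Spec_genChords genChords genChords_alt
  show (List.range 7).foldl (genChordsStep (scale ++ scale ++ scale) d) [[],[],[],[],[],[],[]]
      = _
  generalize scale ++ scale ++ scale = rs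
  rcases lt_or_ge 1 d with h1 | h1
  · rcases lt_or_ge 2 d with h2 | h2
    · rcases lt_or_ge 3 d with h3 | h3
      · simp [List.range_succ, genChordsStep, if_pos h1, if_pos h2, if_pos h3, pyZipN]
      · simp [List.range_succ, genChordsStep, if_pos h1, if_pos h2,
          if_neg (by omega : ¬ d > 3), pyZipN]
    · simp [List.range_succ, genChordsStep, if_pos h1, if_neg (by omega : ¬ d > 2),
        if_neg (by omega : ¬ d > 3), pyZipN]
  · simp [List.range_succ, genChordsStep, if_neg (by omega : ¬ d > 1),
      if_neg (by omega : ¬ d > 2), if_neg (by omega : ¬ d > 3), pyZipN]
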